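-- pv_equiv track=rewrite | github.com/adenjonah/Science-of-Blockchain | hw6/main.py | bitPreprocessMessage
-- ===== SOURCE A (Python) =====
-- def chunker(bits, chunk_length=8):
--     chunked = []
--     for b in range(0, len(bits), chunk_length):
--         chunked.append(bits[b : b + chunk_length])
--     return chunked
--
-- def fillZeros(bits, length=8, endian='LE'):
--     l = len(bits)
--     if endian == 'LE':
--         for _ in range(l, length):
--             bits.append(0)
--     else:
--         while l < length:
--             bits.insert(0, 0)
--             l = len(bits)
--     return bits
--
-- def bitPreprocessMessage(bitinput):
--     bits = bitinput.copy()
--     length = len(bits)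
--     message_len = [int(b) for b in bin(length)[2:].zfill(64)]
--     if length < 448:
--         bits.append(1)
--         bits = fillZeros(bits, 448, 'LE')
--         bits += message_len
--         return [bits]
--     elif 448 <= length <= 512:
--         bits.append(1)
--         bits = fillZeros(bits, 1024, 'LE')
--         bits[-64:] = message_len
--         return chunker(bits, 512)
--     else:
--         bits.append(1)
--         while (len(bits) + 64) % 512 != 0:
--             bits.append(0)
--         bits += message_len
--         return chunker(bits, 512)
-- ===== SOURCE B (Python) =====
-- def bitPreprocessMessage(bitinput):
--     length = len(bitinput)
--     message_len = [int(b) for b in bin(length)[2:].zfill(64)]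
--     # one uniform path: pad count in closed form instead of three branches
--     padded = bitinput + [1] + [0] * ((448 - (length + 1)) % 512) + message_len
--     return [padded[i:i + 512] for i in range(0, len(padded), 512)]
-- ===== Notes on version B (the rewrite author's own statement) =====
-- stated objective: simpler
-- what changed: Replaces A's three-way length branching (with fillZeros padding, slice assignment of the last 64 bits, and an append-until-aligned while loop) by one uniform path: a closed-form zero-pad count (448 - (length+1)) % 512 and a single chunking comprehension.
import Mathlib
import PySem

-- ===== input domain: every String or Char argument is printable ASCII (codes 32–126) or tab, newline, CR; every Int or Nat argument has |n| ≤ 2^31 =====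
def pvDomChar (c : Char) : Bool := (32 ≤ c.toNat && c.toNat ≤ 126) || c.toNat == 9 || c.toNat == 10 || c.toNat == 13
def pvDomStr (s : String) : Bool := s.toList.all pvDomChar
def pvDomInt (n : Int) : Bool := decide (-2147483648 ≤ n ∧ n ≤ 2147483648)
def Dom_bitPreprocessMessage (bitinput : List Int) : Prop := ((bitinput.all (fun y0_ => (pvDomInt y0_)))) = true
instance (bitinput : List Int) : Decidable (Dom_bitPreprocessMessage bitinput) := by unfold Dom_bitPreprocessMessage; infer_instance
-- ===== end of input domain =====

-- B replaces A's three-way length branch and append-until-aligned loop by one uniform path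
-- with a closed-form zero-pad count and a single chunking comprehension (objective: simpler).

-- ===== PORT A =====
-- bin(n)[2:] : binary digits of n (MSB first) as ints; bin(0)[2:] = "0"
-- structural fuel recursion (n halvings of n always fit in n steps)
def pvBinRecAux : Nat → Nat → List Int
  | 0, _ => []
  | fuel + 1, n => if n = 0 then [] else pvBinRecAux fuel (n / 2) ++ [((n % 2 : Nat) : Int)]

def pvBinRec (n : Nat) : List Int := pvBinRecAux n n

-- [int(b) for b in bin(n)[2:].zfill(64)]  (both Pythons compute message_len by this same expression)
def pvMsgLen (n : Nat) : List Int :=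
  let d := if n = 0 then [(0 : Int)] else pvBinRec n
  List.replicate (64 - d.length) 0 ++ d

def chunker (bits : List Int) (chunkLength : Int) : List (List Int) :=
  (PySem.List.pyRange 0 (bits.length : Int) chunkLength).foldl
    (fun chunked b => chunked ++ [PySem.List.slice bits (some b) (some (b + chunkLength))]) []

-- fillZeros: 'LE' appends zeros up to length, 'BE' prepends (A only calls it with 'LE')
def fillZeros (bits : List Int) (length : Nat) (endian : String) : List Int :=
  if endian = "LE" then bits ++ List.replicate (length - bits.length) 0
  else List.replicate (length - bits.length) 0 ++ bits

-- while (len(bits) + 64) % 512 != 0: bits.append(0)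
-- (structural fuel recursion: at most (512 - (len+64) % 512) % 512 < 512 zeros are ever appended)
def padWhileAux : Nat → List Int → List Int
  | 0, bits => bits
  | fuel + 1, bits => if (bits.length + 64) % 512 ≠ 0 then padWhileAux fuel (bits ++ [0]) else bits

def padWhile (bits : List Int) : List Int := padWhileAux 512 bits

def bitPreprocessMessage (bitinput : List Int) : List (List Int) :=
  let bits := bitinput
  let length := bits.length
  let message_len := pvMsgLen length
  if length < 448 then
    let bits := fillZeros (bits ++ [1]) 448 "LE"
    [bits ++ message_len]
  else if length ≤ 512 then
    let bits := fillZeros (bits ++ [1]) 1024 "LE"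
    -- bits[-64:] = message_len : replace the last 64 entries (len bits = 1024 here)
    chunker (bits.take (bits.length - 64) ++ message_len) 512
  else
    chunker (padWhile (bits ++ [1]) ++ message_len) 512

-- ===== PORT B =====
def bitPreprocessMessage_alt (bitinput : List Int) : List (List Int) :=
  let length := bitinput.length
  let message_len := pvMsgLen length
  let padded := bitinput ++ [1] ++
    List.replicate (PySem.Int.mod (448 - ((length : Int) + 1)) 512).toNat 0 ++ message_len
  (PySem.List.pyRange 0 (padded.length : Int) 512).map
    (fun i => PySem.List.slice padded (some i) (some (i + 512)))

-- ===== PRECONDITION & SPEC =====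
def Spec_bitPreprocessMessage (bitinput : List Int) (out : List (List Int)) : Prop := out = bitPreprocessMessage_alt bitinput
instance (bitinput : List Int) (out : List (List Int)) : Decidable (Spec_bitPreprocessMessage bitinput out) := by unfold Spec_bitPreprocessMessage; infer_instance

-- ===== CLAIM (what is proved, stated in full; the proofs are below) =====
def Claim_equal_bitPreprocessMessage : Prop := ∀ (bitinput : List Int), Dom_bitPreprocessMessage bitinput → Spec_bitPreprocessMessage bitinput (bitPreprocessMessage bitinput)

-- ===== LEMMAS AND PROOFS =====

-- B's closed-form zero count equals the count A's while-loop (or fill) produces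
lemma pvPadCount (n : Nat) :
    (PySem.Int.mod (448 - ((n : Int) + 1)) 512).toNat = (512 - ((n + 1) + 64) % 512) % 512 := by
  rw [PySem.Int.mod_eq_emod_of_pos (by norm_num)]
  omega

lemma pvBinRecAux_length_le : ∀ (fuel n k : Nat), n ≤ fuel → n < 2 ^ k →
    (pvBinRecAux fuel n).length ≤ k := by
  intro fuel
  induction fuel with
  | zero => intro n k h1 _; interval_cases n; simp [pvBinRecAux]
  | succ fuel ih =>
    intro n k h1 h2
    unfold pvBinRecAux
    split
    · simp
    · simp only [List.length_append, List.length_cons, List.length_nil]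
      rename_i hn
      cases k with
      | zero => omega
      | succ k =>
        have h2' : n / 2 < 2 ^ k := by
          have : (2:Nat) ^ (k+1) = 2 * 2 ^ k := by ring
          omega
        have := ih (n / 2) k (by omega) h2'
        omega

lemma pvBinRec_length_le (k : Nat) (n : Nat) (h : n < 2 ^ k) : (pvBinRec n).length ≤ k :=
  pvBinRecAux_length_le n n k le_rfl h

lemma pvMsgLen_length (n : Nat) (h : n < 2 ^ 64) : (pvMsgLen n).length = 64 := by
  unfold pvMsgLen
  simp only [List.length_append, List.length_replicate]
  have := pvBinRec_length_le 64 n h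
  split
  · simp
  · omega

lemma chunker_eq_map (bits : List Int) (c : Int) :
    chunker bits c = (PySem.List.pyRange 0 (bits.length : Int) c).map
      (fun b => PySem.List.slice bits (some b) (some (b + c))) := by
  unfold chunker
  rw [PySem.List.foldl_append_singleton_eq_map]
  rfl

lemma padWhileAux_eq : ∀ (fuel : Nat) (bits : List Int),
    (512 - (bits.length + 64) % 512) % 512 ≤ fuel →
    padWhileAux fuel bits = bits ++ List.replicate ((512 - (bits.length + 64) % 512) % 512) 0 := by
  intro fuel
  induction fuel with
  | zero =>
    intro bits h
    have h0 : (512 - (bits.length + 64) % 512) % 512 = 0 := by omega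
    simp [padWhileAux, h0]
  | succ fuel ih =>
    intro bits h
    unfold padWhileAux
    split
    · rename_i hc
      rw [ih (bits ++ [0]) (by
        simp only [List.length_append, List.length_cons, List.length_nil]; omega)]
      simp only [List.length_append, List.length_cons, List.length_nil, List.append_assoc]
      congr 1
      have : (512 - (bits.length + 64) % 512) % 512
          = ((512 - (bits.length + (0 + 1) + 64) % 512) % 512) + 1 := by omega
      rw [this, List.replicate_succ]
      rfl
    · rename_i hc
      have h0 : (512 - (bits.length + 64) % 512) % 512 = 0 := by omega
      simp [h0]

lemma padWhile_eq (L : List Int) :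
    padWhile L = L ++ List.replicate ((512 - (L.length + 64) % 512) % 512) 0 :=
  padWhileAux_eq 512 L (by omega)

-- ===== VERDICT (by name: the statement is the Claim_ definition above) =====
set_option maxRecDepth 8192 in
theorem bitPreprocessMessage_spec : Claim_equal_bitPreprocessMessage := by
  intro bitinput _
  unfold Spec_bitPreprocessMessage bitPreprocessMessage bitPreprocessMessage_alt fillZeros
  simp only [if_pos, List.length_append, List.length_cons, List.length_nil,
    List.length_replicate, Nat.zero_add]
  by_cases h1 : bitinput.length < 448
  · rw [if_pos h1]
    have hk : (PySem.Int.mod (448 - ((bitinput.length : Int) + 1)) 512).toNat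
        = 448 - (bitinput.length + 1) := by
      rw [PySem.Int.mod_eq_emod_of_pos (by norm_num)]; omega
    have hm : (pvMsgLen bitinput.length).length = 64 :=
      pvMsgLen_length _ (lt_trans h1 (by norm_num))
    rw [hk, hm]
    have h512 : bitinput.length + 1 + (448 - (bitinput.length + 1)) + 64 = 512 := by omega
    rw [h512]
    have hr : PySem.List.pyRange 0 ((512 : Nat) : Int) 512 = [0] := by decide
    rw [hr]
    simp only [List.map_cons, List.map_nil, PySem.List.slice_zero_start]
    norm_num
    rw [PySem.List.slice_to _ (show (0:Int) ≤ 512 by norm_num)]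
    norm_num
    rw [hm]
    omega
  · rw [if_neg h1]
    by_cases h2 : bitinput.length ≤ 512
    · rw [if_pos h2, chunker_eq_map]
      have hk : (PySem.Int.mod (448 - ((bitinput.length : Int) + 1)) 512).toNat
          = 960 - (bitinput.length + 1) := by
        rw [PySem.Int.mod_eq_emod_of_pos (by norm_num)]; omega
      have ht : List.take (bitinput.length + 1 + (1024 - (bitinput.length + 1)) - 64)
            (bitinput ++ [1] ++ List.replicate (1024 - (bitinput.length + 1)) 0)
          = bitinput ++ [1] ++ List.replicate (960 - (bitinput.length + 1)) 0 := by
        rw [List.take_append, List.take_replicate]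
        have hle : (bitinput ++ [1]).length ≤ bitinput.length + 1 + (1024 - (bitinput.length + 1)) - 64 := by
          simp only [List.length_append, List.length_cons, List.length_nil, Nat.zero_add]; omega
        rw [List.take_of_length_le hle]
        congr 1
        simp only [List.length_append, List.length_cons, List.length_nil, Nat.zero_add]
        congr 1
        omega
      rw [ht, hk]
      simp only [List.length_append, List.length_cons, List.length_nil,
        List.length_replicate, Nat.zero_add]
    · rw [if_neg h2]
      rw [padWhile_eq, chunker_eq_map]
      simp only [List.length_append, List.length_cons, List.length_nil, List.append_assoc,
        pvPadCount bitinput.length, List.length_replicate, Nat.zero_add]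
      congr 3
      omega
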